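-- pv_equiv track=rewrite | github.com/vipul8901/Constraint-Satisfaction-Problem | driver.py | state_chk
-- ===== SOURCE A (Python) =====
-- def state_chk(state):
--
--     if len(state)==0:
--         return "result"
--     dom_size=[ len(state[i]) for i in state ] #checks domain size for every unassigned value
--
--     if dom_size.count(0) >=1: #checks if domain size is 0 for any unassigned value
--         return "Failure"
--     #elif len(state)==sum(dom_size):
--     #    return "result"
--     elif len(state)<sum(dom_size):
--         return "valid"
-- ===== SOURCE B (Python) =====
-- def state_chk(state):
--     # Order-statistics formulation: sort the domain sizes once; the smallest
--     # size tells whether any domain is empty, and (all sizes >= 1 then) the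
--     # largest size tells whether the total exceeds the number of variables,
--     # since sum > n  iff  some of the n sizes (each >= 1) is >= 2.
--     if len(state) == 0:
--         return "result"
--     sizes = sorted(len(state[k]) for k in state)
--     if sizes[0] == 0:
--         return "Failure"
--     if sizes[-1] >= 2:
--         return "valid"
-- ===== Notes on version B (the rewrite author's own statement) =====
-- stated objective: alternative
-- what changed: Replaces counting zeros and summing the sizes by order statistics: sort the domain sizes once, read 'Failure' off the minimum (sizes[0]==0) and 'valid' off the maximum (sizes[-1]>=2, which given no zeros is equivalent to len(state)<sum); Pre_ excludes association lists with duplicate keys, impossible for a Python dict.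
import Mathlib
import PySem

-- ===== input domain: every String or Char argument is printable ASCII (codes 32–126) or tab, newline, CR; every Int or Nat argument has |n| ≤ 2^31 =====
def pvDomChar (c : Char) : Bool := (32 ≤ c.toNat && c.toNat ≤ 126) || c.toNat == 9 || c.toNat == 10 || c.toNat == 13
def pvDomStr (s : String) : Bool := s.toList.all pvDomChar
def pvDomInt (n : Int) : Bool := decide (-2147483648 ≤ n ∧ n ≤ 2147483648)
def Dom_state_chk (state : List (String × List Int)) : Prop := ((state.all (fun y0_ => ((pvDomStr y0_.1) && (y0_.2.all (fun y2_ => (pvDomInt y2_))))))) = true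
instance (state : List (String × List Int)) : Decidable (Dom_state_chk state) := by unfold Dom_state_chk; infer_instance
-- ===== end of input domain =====

-- B replaces A's zero-count and size-sum by order statistics on the sorted size list
-- (min = sizes[0] decides 'Failure', max = sizes[-1] decides 'valid'); objective: alternative.

-- ===== PORT A =====
-- state[i] on the dict-as-assoc-list: first-match lookup (exact for nodup keys, which Pre_ guarantees)
def pvLookup (state : List (String × List Int)) (k : String) : List Int :=
  ((state.find? (fun p => p.1 == k)).map Prod.snd).getD []

def state_chk (state : List (String × List Int)) : Option String :=
  if state.length = 0 then some "result"
  else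
    let dom_size : List Int := state.map (fun p => ((pvLookup state p.1).length : Int))
    if 1 ≤ dom_size.count 0 then some "Failure"
    else if (state.length : Int) < dom_size.sum then some "valid"
    else none

-- ===== PORT B =====
def state_chk_alt (state : List (String × List Int)) : Option String :=
  if state.length = 0 then some "result"
  else
    let sizes := PySem.List.sorted (state.map (fun p => (p.2.length : Int))) (fun x => x) false
    -- sizes[0] / sizes[-1]: sizes is nonempty here, so the defaults are never used
    if sizes.headD 0 = 0 then some "Failure"
    else if 2 ≤ sizes.getLastD 0 then some "valid"
    else none

-- ===== PRECONDITION & SPEC =====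
-- Pre_ excludes association lists with duplicate keys: a Python dict cannot contain them
-- (the collapsed dict A actually receives is a different input), so equivalence there is accidental.
def Pre_state_chk (state : List (String × List Int)) : Prop := (state.map Prod.fst).Nodup
instance (state : List (String × List Int)) : Decidable (Pre_state_chk state) := by unfold Pre_state_chk; infer_instance
def pvWitness_state_chk : (List (String × List Int)) := [("a", [1, 2]), ("b", [3])]

def Spec_state_chk (state : List (String × List Int)) (out : Option String) : Prop := out = state_chk_alt state
instance (state : List (String × List Int)) (out : Option String) : Decidable (Spec_state_chk state out) := by unfold Spec_state_chk; infer_instance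

-- ===== CLAIM (what is proved, stated in full; the proofs are below) =====
def Claim_equal_state_chk : Prop := ∀ (state : List (String × List Int)), Dom_state_chk state → Pre_state_chk state → Spec_state_chk state (state_chk state)

-- ===== LEMMAS AND PROOFS =====

theorem pvLookup_eq (state : List (String × List Int)) (h : (state.map Prod.fst).Nodup)
    (p : String × List Int) (hp : p ∈ state) : pvLookup state p.1 = p.2 := by
  induction state with
  | nil => cases hp
  | cons q t ih =>
    simp only [List.map_cons, List.nodup_cons] at h
    rcases List.mem_cons.mp hp with rfl | hpt
    · simp [pvLookup, List.find?]
    · have hne : q.1 ≠ p.1 := fun e => h.1 (e ▸ List.mem_map_of_mem hpt)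
      have := ih h.2 hpt
      rw [pvLookup] at this ⊢
      rw [List.find?_cons_of_neg (by simpa using hne)]
      exact this

theorem getLastD_mem (l : List Int) (h : l ≠ []) : l.getLastD 0 ∈ l := by
  induction l with
  | nil => simp at h
  | cons a t ih =>
    cases t with
    | nil => simp
    | cons b u =>
      have := ih (by simp)
      rw [show (a :: b :: u).getLastD 0 = (b :: u).getLastD 0 from rfl]
      exact List.mem_cons_of_mem a this

-- in a ≤-pairwise list, every element is at most the last one
theorem le_getLastD_of_pairwise (l : List Int) (hl : l.Pairwise (· ≤ ·)) :
    ∀ y ∈ l, y ≤ l.getLastD 0 := by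
  induction l with
  | nil => intro y hy; cases hy
  | cons a t ih =>
    intro y hy
    rcases List.mem_cons.mp hy with rfl | hyt
    · cases t with
      | nil => simp
      | cons b u =>
        have hab : ∀ z ∈ b :: u, y ≤ z := (List.pairwise_cons.mp hl).1
        simpa using hab _ (getLastD_mem (b :: u) (by simp))
    · have := ih (List.pairwise_cons.mp hl).2 y hyt
      cases t with
      | nil => cases hyt
      | cons b u => simpa using this

theorem length_le_sum (l : List Int) (h1 : ∀ x ∈ l, (1 : Int) ≤ x) :
    (l.length : Int) ≤ l.sum := by
  induction l with
  | nil => simp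
  | cons a t ih =>
    have ha : (1 : Int) ≤ a := h1 a (by simp)
    have := ih (fun x hx => h1 x (by simp [hx]))
    simp only [List.length_cons, List.sum_cons]
    push_cast
    omega

-- if every element is ≥ 1, the sum exceeds the length iff some element is ≥ 2
theorem sum_gt_length_iff (l : List Int) (h1 : ∀ x ∈ l, (1 : Int) ≤ x) :
    ((l.length : Int) < l.sum) ↔ ∃ x ∈ l, (2 : Int) ≤ x := by
  induction l with
  | nil => simp
  | cons a t ih =>
    have ha : (1 : Int) ≤ a := h1 a (by simp)
    have ht : ∀ x ∈ t, (1 : Int) ≤ x := fun x hx => h1 x (by simp [hx])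
    have hlen : (t.length : Int) ≤ t.sum := length_le_sum t ht
    simp only [List.length_cons, List.sum_cons]
    constructor
    · intro hlt
      by_cases h2 : (2 : Int) ≤ a
      · exact ⟨a, by simp, h2⟩
      · have : (t.length : Int) < t.sum := by push_cast at hlt ⊢; omega
        rcases (ih ht).mp this with ⟨x, hx, h2x⟩
        exact ⟨x, by simp [hx], h2x⟩
    · rintro ⟨x, hx, h2x⟩
      rcases List.mem_cons.mp hx with rfl | hxt
      · push_cast; omega
      · have : (t.length : Int) < t.sum := (ih ht).mpr ⟨x, hxt, h2x⟩
        push_cast at this ⊢; omega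

-- ===== VERDICT (by name: the statement is the Claim_ definition above) =====
theorem state_chk_spec : Claim_equal_state_chk := by
  intro state _ hpre
  unfold Spec_state_chk state_chk state_chk_alt
  by_cases h0 : state.length = 0
  · simp [h0]
  · simp only [h0, if_false]
    have hmap : state.map (fun p => ((pvLookup state p.1).length : Int))
        = state.map (fun p => (p.2.length : Int)) :=
      List.map_congr_left (fun p hp => by rw [pvLookup_eq state hpre p hp])
    rw [hmap]
    set l := state.map (fun p => (p.2.length : Int)) with hl
    set s := PySem.List.sorted l (fun x => x) false with hs
    have hperm : s.Perm l := PySem.List.sorted_perm l (fun x => x) false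
    have hpw : s.Pairwise (· ≤ ·) := by
      simpa using PySem.List.sorted_pairwise l (fun x => x)
    have hnonneg : ∀ x ∈ l, (0 : Int) ≤ x := by
      intro x hx; rcases List.mem_map.mp hx with ⟨p, _, rfl⟩; positivity
    obtain ⟨m, t, hst⟩ : ∃ m t, s = m :: t := by
      cases hse : s with
      | nil =>
        exfalso
        have : l = [] := by
          have := hperm.length_eq; rw [hse] at this; simpa using (List.length_eq_zero_iff.mp this.symm)
        rw [hl] at this; simp at this
        exact h0 (by simp [this])
      | cons m t => exact ⟨m, t, rfl⟩
    have hm_mem : m ∈ l := hperm.mem_iff.mp (by simp [hst])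
    have hm_min : ∀ y ∈ l, m ≤ y := by
      intro y hy
      simpa using PySem.List.key_head_sorted_le (xs := l) (key := fun x => x)
        (hs.symm.trans hst) y hy
    by_cases hz : m = 0
    · -- A: 0 ∈ l so count 0 ≥ 1; B: head = 0
      have hcnt : 1 ≤ l.count 0 := List.one_le_count_iff.mpr (hz ▸ hm_mem)
      simp [hst, hz, hcnt]
    · have h0notin : (0 : Int) ∉ l := fun h =>
        hz (le_antisymm (by simpa using hm_min 0 h) (hnonneg m hm_mem))
      have hcnt : ¬ (1 ≤ l.count 0) := by
        simp [List.count_eq_zero.mpr h0notin]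
      have h1 : ∀ x ∈ l, (1 : Int) ≤ x := by
        intro x hx
        have := hnonneg x hx
        rcases lt_or_eq_of_le this with h | h
        · omega
        · exact absurd (h ▸ hx) h0notin
      have hlenl : state.length = l.length := by simp [hl]
      have hsum : ((state.length : Int) < l.sum) ↔ ∃ x ∈ l, (2 : Int) ≤ x := by
        rw [hlenl]; exact sum_gt_length_iff l h1
      have hlast_mem : s.getLastD 0 ∈ l := by
        apply hperm.mem_iff.mp
        rw [hst]
        exact getLastD_mem (m :: t) (by simp)
      have hmax : (2 ≤ s.getLastD 0) ↔ ∃ x ∈ l, (2 : Int) ≤ x := by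
        constructor
        · intro h2; exact ⟨_, hlast_mem, h2⟩
        · rintro ⟨x, hx, h2⟩
          have : x ≤ s.getLastD 0 :=
            le_getLastD_of_pairwise s hpw x (hperm.mem_iff.mpr hx)
          omega
      by_cases h2 : 2 ≤ s.getLastD 0
      · have h2' : 2 ≤ (m :: t).getLast?.getD 0 := by
          rw [← List.getLastD_eq_getLast?]; exact hst ▸ h2
        simp [hcnt, hst, hz, h2', hsum.mpr (hmax.mp h2)]
      · have hns : ¬ ((state.length : Int) < l.sum) := fun h => h2 (hmax.mpr (hsum.mp h))
        have h2' : ¬ 2 ≤ (m :: t).getLast?.getD 0 := by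
          rw [← List.getLastD_eq_getLast?]; exact hst ▸ h2
        simp [hcnt, hst, hz, h2', hns]
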